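-- pv_equiv track=rewrite | github.com/tizianonade/uio | uio.py | appliquer_uio
-- ===== SOURCE A (Python) =====
-- noeuds = ["Attente", "Montant insuffisant", "Montant suffisant", "Remboursement"]
--
-- aretes = [
--     [("Attente", "Montant insuffisant"), ("25", "OUTPUT_MESSAGE_INSUFFISANT")],
--     [("Attente", "Montant suffisant"), ("50", "OUTPUT_MESSAGE_ATTENTE")],
--     [("Attente", "Remboursement"), ("100", "OUTPUT_MESSAGE_REMBOURSEMENT")],
--     [("Montant insuffisant", "Montant suffisant"), ("25", "OUTPUT_MESSAGE_ATTENTE")],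
--     [("Montant insuffisant", "Remboursement"), ("50", "OUTPUT_MESSAGE_REMBOURSEMENT")],
--     [("Remboursement", "Montant suffisant"), ("OUTPUT_PIECE", "50")],
--     [("Montant suffisant", "Attente"), ("SELECTION_CAFE", "OUTPUT_CAFE")]
-- ]
--
-- def est_injection(entrees_sorties, sequence):
--     # Vérifie si la séquence est une injection unique dans les entrées/sorties fournies
--     for e, s in entrees_sorties:
--         if e in sequence and s != sequence[e]:
--             return False
--     return True
--
-- def appliquer_uio(noeuds, aretes):
--     sequences = {}  # Dictionnaire pour stocker les séquences
--     entrees_sorties = []  # Liste pour stocker les entrées/sorties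
--
--     # Extraction des entrées/sorties
--     for arrete in aretes:
--         entree, sortie = arrete[1]
--         entrees_sorties.append((entree, sortie))
--
--     # Parcours du graphe pour trouver les séquences minimales
--     for noeud in noeuds:
--         for arrete in aretes:
--             depart, arrivee = arrete[0]
--
--             if depart == noeud:
--                 entree, sortie = arrete[1]
--
--                 for arrete_cible in aretes:
--                     depart_cible, arrivee_cible = arrete_cible[0]
--
--                     if depart_cible == arrivee: #and arrivee_cible != noeud:
--                         entree_cible, sortie_cible = arrete_cible[1]
--                         sequence = {entree: sortie, entree_cible: sortie_cible}
--
--                         if est_injection(entrees_sorties, sequence):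
--                             sequences[f"Sequence {len(sequences) + 1}"] = sequence
--
--     return sequences
--
-- sequences = appliquer_uio(noeuds, aretes)
-- ===== SOURCE B (Python) =====
-- def _entree_unique(ios):
--     # unique[e] = s if every occurrence of entree e in ios has sortie s, else None
--     unique = {}
--     for e, s in ios:
--         unique[e] = s if unique.get(e, s) == s else None
--     return unique
--
--
-- def _index_par_depart(aretes):
--     # edges indexed by departure node, insertion order preserved
--     by_dep = {}
--     for a in aretes:
--         by_dep.setdefault(a[0][0], []).append(a)
--     return by_dep
--
--
-- def appliquer_uio(noeuds, aretes):
--     ios = [a[1] for a in aretes]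
--     unique = _entree_unique(ios)
--     by_dep = _index_par_depart(aretes)
--     result = {}
--     for noeud in noeuds:
--         for a in by_dep.get(noeud, []):
--             arrivee = a[0][1]
--             e, s = a[1]
--             for b in by_dep.get(arrivee, []):
--                 e2, s2 = b[1]
--                 if unique[e2] == s2 and (e == e2 or unique[e] == s):
--                     result[f"Sequence {len(result) + 1}"] = {e: s, e2: s2}
--     return result
-- ===== Notes on version B (the rewrite author's own statement) =====
-- stated objective: faster
-- what changed: B indexes the edges by departure node once (removing both full rescans of aretes per node/edge) and precomputes a single entree->unique-sortie map so each candidate pair is checked in O(1) instead of rescanning all edge labels with est_injection.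
import Mathlib
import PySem

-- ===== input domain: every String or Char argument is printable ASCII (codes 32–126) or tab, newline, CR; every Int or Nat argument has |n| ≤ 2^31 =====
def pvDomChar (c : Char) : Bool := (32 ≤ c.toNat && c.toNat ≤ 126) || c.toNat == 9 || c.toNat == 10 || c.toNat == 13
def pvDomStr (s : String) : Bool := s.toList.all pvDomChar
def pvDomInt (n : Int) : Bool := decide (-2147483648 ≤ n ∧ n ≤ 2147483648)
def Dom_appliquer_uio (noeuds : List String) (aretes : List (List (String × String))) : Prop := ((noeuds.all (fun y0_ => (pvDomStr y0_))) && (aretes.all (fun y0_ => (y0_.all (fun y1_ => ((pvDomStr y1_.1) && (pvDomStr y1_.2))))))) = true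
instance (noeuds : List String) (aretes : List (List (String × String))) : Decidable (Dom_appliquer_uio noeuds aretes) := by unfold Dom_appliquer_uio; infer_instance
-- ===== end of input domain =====

-- B replaces A's repeated scans of `aretes` by a one-shot index by departure node and a
-- precomputed entree→unique-sortie map (objective: faster, asymptotically fewer scans).

-- shared subscript helper: a[i]; Python raises IndexError where pyGet? is none —
-- Pre_appliquer_uio excludes those inputs, so the ("","") default is never read under Pre_.
def pvSub (a : List (String × String)) (i : Int) : String × String :=
  (PySem.List.pyGet? a i).getD ("", "")

-- ===== PORT A =====
def est_injection (entrees_sorties : List (String × String))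
    (sequence : PySem.Dict String String) : Bool :=
  match entrees_sorties with
  | [] => true
  | (e, s) :: rest =>
    match sequence.get? e with
    | some v => if s ≠ v then false else est_injection rest sequence
    | none => est_injection rest sequence

def appliquer_uio (noeuds : List String) (aretes : List (List (String × String))) :
    List (String × List (String × String)) :=
  let entrees_sorties : List (String × String) :=
    aretes.foldl (fun acc arrete => acc ++ [pvSub arrete 1]) []
  let sequences : PySem.Dict String (List (String × String)) :=
    noeuds.foldl (fun seqs noeud =>
      aretes.foldl (fun seqs arrete =>
        if (pvSub arrete 0).1 == noeud then
          aretes.foldl (fun seqs arrete_cible =>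
            if (pvSub arrete_cible 0).1 == (pvSub arrete 0).2 then
              let sequence : PySem.Dict String String :=
                (PySem.Dict.empty.insert (pvSub arrete 1).1 (pvSub arrete 1).2).insert
                  (pvSub arrete_cible 1).1 (pvSub arrete_cible 1).2
              if est_injection entrees_sorties sequence then
                seqs.insert ("Sequence " ++ PySem.Int.toStr ((seqs.size : Int) + 1)) sequence.items
              else seqs
            else seqs) seqs
        else seqs) seqs) PySem.Dict.empty
  sequences.items

-- ===== PORT B =====
def pvUnique (ios : List (String × String)) : PySem.Dict String (Option String) :=
  ios.foldl (fun d p =>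
    d.insert p.1 (if d.getD p.1 (some p.2) == some p.2 then some p.2 else none))
    PySem.Dict.empty

def pvIndex (aretes : List (List (String × String))) :
    PySem.Dict String (List (List (String × String))) :=
  aretes.foldl (fun d a => d.modify (pvSub a 0).1 [] (· ++ [a])) PySem.Dict.empty

def appliquer_uio_alt (noeuds : List String) (aretes : List (List (String × String))) :
    List (String × List (String × String)) :=
  let ios : List (String × String) := aretes.map (fun a => pvSub a 1)
  let unique := pvUnique ios
  let by_dep := pvIndex aretes
  let result : PySem.Dict String (List (String × String)) :=
    noeuds.foldl (fun res noeud =>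
      (by_dep.getD noeud []).foldl (fun res a =>
        (by_dep.getD (pvSub a 0).2 []).foldl (fun res b =>
          if unique.getD (pvSub b 1).1 none == some (pvSub b 1).2 &&
              ((pvSub a 1).1 == (pvSub b 1).1 ||
                unique.getD (pvSub a 1).1 none == some (pvSub a 1).2) then
            res.insert ("Sequence " ++ PySem.Int.toStr ((res.size : Int) + 1))
              ((PySem.Dict.empty.insert (pvSub a 1).1 (pvSub a 1).2).insert
                (pvSub b 1).1 (pvSub b 1).2).items
          else res) res) res) PySem.Dict.empty
  result.items

-- ===== PRECONDITION & SPEC =====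
-- Python A indexes arete[0] and arete[1]; it raises IndexError on any edge shorter than 2.
def Pre_appliquer_uio (noeuds : List String) (aretes : List (List (String × String))) : Prop :=
  ∀ a ∈ aretes, 2 ≤ a.length
instance (noeuds : List String) (aretes : List (List (String × String))) : Decidable (Pre_appliquer_uio noeuds aretes) := by unfold Pre_appliquer_uio; infer_instance

def pvWitness_appliquer_uio : List String × (List (List (String × String))) :=
  (["Attente", "Fin"], [[("Attente", "Fin"), ("25", "OK")], [("Fin", "Attente"), ("50", "BYE")]])

def Spec_appliquer_uio (noeuds : List String) (aretes : List (List (String × String))) (out : List (String × List (String × String))) : Prop := out = appliquer_uio_alt noeuds aretes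
instance (noeuds : List String) (aretes : List (List (String × String))) (out : List (String × List (String × String))) : Decidable (Spec_appliquer_uio noeuds aretes out) := by unfold Spec_appliquer_uio; infer_instance

-- ===== CLAIM (what is proved, stated in full; the proofs are below) =====
def Claim_equal_appliquer_uio : Prop := ∀ (noeuds : List String) (aretes : List (List (String × String))), Dom_appliquer_uio noeuds aretes → Pre_appliquer_uio noeuds aretes → Spec_appliquer_uio noeuds aretes (appliquer_uio noeuds aretes)

-- ===== LEMMAS AND PROOFS =====

theorem pv_all_congr {α : Type} {l : List α} {p q : α → Bool}
    (h : ∀ x ∈ l, p x = q x) : l.all p = l.all q := by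
  induction l with
  | nil => rfl
  | cons x xs ih =>
    simp only [List.all_cons, h x (List.mem_cons_self ..),
      ih (fun y hy => h y (List.mem_cons_of_mem _ hy))]

theorem pv_all_and {α : Type} (l : List α) (p q : α → Bool) :
    l.all (fun x => p x && q x) = (l.all p && l.all q) := by
  induction l with
  | nil => rfl
  | cons x xs ih =>
    simp only [List.all_cons, ih]
    cases p x <;> cases q x <;> simp

theorem pv_est_eq_all (es : List (String × String)) (seq : PySem.Dict String String) :
    est_injection es seq =
      es.all (fun q => match seq.get? q.1 with | some v => q.2 == v | none => true) := by
  induction es with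
  | nil => rfl
  | cons q rest ih =>
    obtain ⟨e, s⟩ := q
    rw [est_injection, List.all_cons]
    cases h : seq.get? e with
    | none => simp [h, ih]
    | some v =>
      by_cases hsv : s = v
      · simp [h, hsv, ih]
      · simp [h, hsv]

theorem pv_getD_eq {ν : Type} (d : PySem.Dict String ν) (k : String) (dflt : ν) :
    d.getD k dflt = (d.get? k).getD dflt := rfl

theorem pv_uniqueGet (es : List (String × String)) (k : String) :
    (pvUnique es).get? k =
      match (es.filter (fun q => q.1 == k)).map (·.2) with
      | [] => none
      | v :: rest => some (if rest.all (· == v) then some v else none) := by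
  induction es using List.reverseRecOn with
  | nil => simp [pvUnique]
  | append_singleton xs p ih =>
    rw [pvUnique, List.foldl_append] at *
    rw [List.foldl_cons, List.foldl_nil, PySem.Dict.get?_insert,
      List.filter_append, List.map_append]
    by_cases hk : k = p.1
    · subst hk
      rw [if_pos rfl, pv_getD_eq, ih]
      have hfil : List.filter (fun q => q.1 == p.1) [p] = [p] := by simp
      rw [hfil, List.map_cons, List.map_nil]
      cases hocc : (xs.filter (fun q => q.1 == p.1)).map (·.2) with
      | nil => simp
      | cons v1 rest =>
        by_cases hall : rest.all (· == v1) = true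
        · by_cases hv : v1 = p.2
          · subst hv
            simp [hall, List.all_append]
          · have h1 : (some v1 == some p.2) = false := by simp [hv]
            have h2 : (p.2 == v1) = false := by
              rw [beq_eq_false_iff_ne]; exact fun h => hv h.symm
            simp [hall, h1, h2, List.all_append]
        · simp only [Bool.not_eq_true] at hall
          simp [hall, List.all_append]
    · have hke : (p.1 == k) = false := by
        rw [beq_eq_false_iff_ne]; exact fun h => hk h.symm
      rw [if_neg hk, ih]
      simp [hke]

theorem pv_unique_getD (es : List (String × String)) (k v : String)
    (hk : ∃ w, (k, w) ∈ es) :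
    ((pvUnique es).getD k none == some v) =
      es.all (fun q => !(q.1 == k) || (q.2 == v)) := by
  obtain ⟨w, hw⟩ := hk
  have hmem : (k, w) ∈ es.filter (fun q => q.1 == k) := by
    simp [List.mem_filter, hw]
  have hall : es.all (fun q => !(q.1 == k) || (q.2 == v))
      = ((es.filter (fun q => q.1 == k)).map (·.2)).all (· == v) := by
    rw [List.all_map]
    induction es with
    | nil => rfl
    | cons x xs ih =>
      by_cases hx : x.1 = k
      · simp [List.filter_cons, hx, ih, Function.comp]
      · simp [List.filter_cons, hx, ih, Function.comp]
  rw [hall]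
  cases hocc : (es.filter (fun q => q.1 == k)).map (·.2) with
  | nil =>
    exfalso
    have : w ∈ (es.filter (fun q => q.1 == k)).map (·.2) := List.mem_map_of_mem hmem
    rw [hocc] at this
    exact (List.not_mem_nil).elim this
  | cons v1 rest =>
    have hget := pv_uniqueGet es k
    rw [hocc] at hget
    rw [pv_getD_eq, hget]
    simp only [Option.getD_some, List.all_cons]
    by_cases hrest : rest.all (· == v1) = true
    · by_cases hv : v1 = v
      · subst hv; simp [hrest]
      · simp only [hrest, if_true]
        have h1 : (some v1 == some v) = false := by simp [hv]
        have h2 : (v1 == v) = false := by simp [hv]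
        simp [h1, h2]
    · simp only [Bool.not_eq_true] at hrest
      by_cases hv : v1 = v
      · subst hv; simp [hrest]
      · have h2 : (v1 == v) = false := by simp [hv]
        simp [hrest, h2]

theorem pv_byDep (aretes : List (List (String × String))) (d : String) :
    (pvIndex aretes).getD d [] = aretes.filter (fun a => (pvSub a 0).1 == d) := by
  have hmap : pvIndex aretes
      = (aretes.map (fun a => ((pvSub a 0).1, a))).foldl
          (fun dd p => dd.modify p.1 [] (· ++ [p.2])) PySem.Dict.empty := by
    rw [pvIndex, List.foldl_map]
  rw [hmap, PySem.Dict.getD_foldl_modify_append]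
  simp [List.filter_map, List.map_map, Function.comp_def]

theorem pv_guard (es : List (String × String)) (e s e2 s2 : String)
    (h1 : (e, s) ∈ es) (h2 : (e2, s2) ∈ es) :
    est_injection es ((PySem.Dict.empty.insert e s).insert e2 s2)
      = ((pvUnique es).getD e2 none == some s2 &&
          (e == e2 || (pvUnique es).getD e none == some s)) := by
  rw [pv_est_eq_all]
  have hkey : ∀ q : String × String,
      (match ((PySem.Dict.empty.insert e s).insert e2 s2).get? q.1 with
        | some v => q.2 == v | none => true)
      = (if q.1 = e2 then q.2 == s2 else if q.1 = e then q.2 == s else true) := by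
    intro q
    rw [PySem.Dict.get?_insert, PySem.Dict.get?_insert]
    by_cases hq2 : q.1 = e2
    · rw [if_pos hq2, if_pos hq2]
    · rw [if_neg hq2, if_neg hq2]
      by_cases hq1 : q.1 = e
      · rw [if_pos hq1, if_pos hq1]
      · rw [if_neg hq1, if_neg hq1]
        simp [PySem.Dict.get?_empty]
  rw [pv_all_congr (fun x _ => hkey x)]
  by_cases he : e = e2
  · subst he
    have hpt : ∀ x ∈ es,
        (if x.1 = e then x.2 == s2 else if x.1 = e then x.2 == s else true)
        = (!(x.1 == e) || (x.2 == s2)) := by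
      intro x _
      by_cases hx : x.1 = e
      · rw [if_pos hx, hx]; simp
      · rw [if_neg hx]
        have : (x.1 == e) = false := by rw [beq_eq_false_iff_ne]; exact hx
        simp [this]
        exact Or.inl hx
    rw [pv_all_congr hpt, ← pv_unique_getD es e s2 ⟨s, h1⟩]
    simp
  · have hpt : ∀ x ∈ es,
        (if x.1 = e2 then x.2 == s2 else if x.1 = e then x.2 == s else true)
        = ((!(x.1 == e2) || (x.2 == s2)) && (!(x.1 == e) || (x.2 == s))) := by
      intro x _
      by_cases hx2 : x.1 = e2
      · have hx1 : (x.1 == e) = false := by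
          rw [beq_eq_false_iff_ne]; exact fun h => he (h.symm.trans hx2)
        rw [if_pos hx2, hx2]
        simp [hx1]
        intro _
        exact Or.inl (fun h => he h.symm)
      · have hb2 : (x.1 == e2) = false := by rw [beq_eq_false_iff_ne]; exact hx2
        rw [if_neg hx2]
        by_cases hx1 : x.1 = e
        · rw [if_pos hx1, hx1]
          simp [hb2]
          intro _
          exact Or.inl he
        · have hb1 : (x.1 == e) = false := by rw [beq_eq_false_iff_ne]; exact hx1
          rw [if_neg hx1]
          simp [hb2, hb1]
    rw [pv_all_congr hpt, pv_all_and,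
      ← pv_unique_getD es e2 s2 ⟨s2, h2⟩, ← pv_unique_getD es e s ⟨s, h1⟩]
    have : (e == e2) = false := by simp [he]
    simp [this]

theorem pv_main (noeuds : List String) (aretes : List (List (String × String))) :
    appliquer_uio noeuds aretes = appliquer_uio_alt noeuds aretes := by
  rw [appliquer_uio, appliquer_uio_alt]
  simp only [PySem.List.foldl_append_singleton_eq_map, List.nil_append, pv_byDep,
    PySem.List.foldl_if_eq_foldl_filter]
  congr 1
  refine PySem.List.foldl_congr_mem _ _ _ _ ?_
  intro seqs noeud _
  refine PySem.List.foldl_congr_mem _ _ _ _ ?_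
  intro seqs2 a ha
  have haA : a ∈ aretes := List.mem_of_mem_filter ha
  congr 1
  refine List.filter_congr ?_
  intro b hb
  have hbA : b ∈ aretes := List.mem_of_mem_filter hb
  have h1 : ((pvSub a 1).1, (pvSub a 1).2) ∈ aretes.map (fun x => pvSub x 1) := by
    simpa using List.mem_map_of_mem haA
  have h2 : ((pvSub b 1).1, (pvSub b 1).2) ∈ aretes.map (fun x => pvSub x 1) := by
    simpa using List.mem_map_of_mem hbA
  exact pv_guard _ _ _ _ _ h1 h2

-- ===== VERDICT (by name: the statement is the Claim_ definition above) =====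
theorem appliquer_uio_spec : Claim_equal_appliquer_uio := by
  intro noeuds aretes _ _
  unfold Spec_appliquer_uio
  exact pv_main noeuds aretes
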